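-- pv_equiv track=rewrite | github.com/PrabowoD/Skripsi | code/Max_Min_coordinate.py | select_near_center_points
-- ===== SOURCE A (Python) =====
-- def select_near_center_points(corners, center):
--     cx, cy = center
--     result = {}
--
--     # Konversi ke format (x, y) agar mudah dibaca
--     pts = [(int(x), int(y)) for y, x in corners]
--
--     # ----- cari min_x -----
--     min_x_val = min(p[0] for p in pts)
--     min_x_candidates = [p for p in pts if p[0] == min_x_val]
--     min_x = min(min_x_candidates, key=lambda p: abs(p[1] - cy))
--
--     # ----- cari max_x -----
--     max_x_val = max(p[0] for p in pts)
--     max_x_candidates = [p for p in pts if p[0] == max_x_val]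
--     max_x = min(max_x_candidates, key=lambda p: abs(p[1] - cy))
--
--     # ----- cari min_y -----
--     min_y_val = min(p[1] for p in pts)
--     min_y_candidates = [p for p in pts if p[1] == min_y_val]
--     min_y = min(min_y_candidates, key=lambda p: abs(p[0] - cx))
--
--     # ----- cari max_y -----
--     max_y_val = max(p[1] for p in pts)
--     max_y_candidates = [p for p in pts if p[1] == max_y_val]
--     max_y = min(max_y_candidates, key=lambda p: abs(p[0] - cx))
--
--     result["min_x"] = min_x
--     result["max_x"] = max_x
--     result["min_y"] = min_y
--     result["max_y"] = max_y
--
--     return result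
-- ===== SOURCE B (Python) =====
-- def select_near_center_points(corners, center):
--     cx, cy = center
--     it = iter(corners)
--     y0, x0 = next(it)  # raises on empty input, as the original does
--     p0 = (int(x0), int(y0))
--     mnx = mxx = mny = mxy = p0
--     dmnx = dmxx = abs(p0[1] - cy)
--     dmny = dmxy = abs(p0[0] - cx)
--     for y, x in it:
--         p = (int(x), int(y))
--         dy = abs(p[1] - cy)
--         dx = abs(p[0] - cx)
--         if p[0] < mnx[0] or (p[0] == mnx[0] and dy < dmnx):
--             mnx, dmnx = p, dy
--         if p[0] > mxx[0] or (p[0] == mxx[0] and dy < dmxx):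
--             mxx, dmxx = p, dy
--         if p[1] < mny[1] or (p[1] == mny[1] and dx < dmny):
--             mny, dmny = p, dx
--         if p[1] > mxy[1] or (p[1] == mxy[1] and dx < dmxy):
--             mxy, dmxy = p, dx
--     return {"min_x": mnx, "max_x": mxx, "min_y": mny, "max_y": mxy}
-- ===== Notes on version B (the rewrite author's own statement) =====
-- stated objective: alternative
-- what changed: A makes eight passes over the points (four min/max value scans and four filter-then-argmin passes); B makes a single pass that maintains the four best points together with their stored tie-break distances, reproducing min()'s first-wins tie-breaking by updating only on a strictly more extreme value or a strict tie-distance improvement.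
import Mathlib
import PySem

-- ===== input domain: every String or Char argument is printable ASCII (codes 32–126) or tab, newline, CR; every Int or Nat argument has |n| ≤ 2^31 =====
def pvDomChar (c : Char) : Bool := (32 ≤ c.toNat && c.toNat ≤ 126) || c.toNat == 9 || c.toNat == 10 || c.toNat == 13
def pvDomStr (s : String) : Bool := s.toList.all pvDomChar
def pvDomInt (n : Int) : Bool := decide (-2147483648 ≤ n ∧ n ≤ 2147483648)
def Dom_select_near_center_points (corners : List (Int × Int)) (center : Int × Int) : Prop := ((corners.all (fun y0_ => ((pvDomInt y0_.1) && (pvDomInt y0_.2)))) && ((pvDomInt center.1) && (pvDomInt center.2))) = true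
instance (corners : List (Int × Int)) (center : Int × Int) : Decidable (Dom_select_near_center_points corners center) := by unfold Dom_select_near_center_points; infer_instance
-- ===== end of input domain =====

-- B replaces A's eight passes (four min/max scans + four filter-and-argmin passes) by ONE loop
-- keeping four running best points with their stored tie-break distances (objective: alternative).

-- ===== PORT A =====
def select_near_center_points (corners : List (Int × Int)) (center : Int × Int) : List (String × Int × Int) :=
  let cx := center.1
  let cy := center.2
  let pts := corners.map (fun yx => (yx.2, yx.1))
  match PySem.List.min? (pts.map (fun p => p.1)) (fun v => v),
        PySem.List.max? (pts.map (fun p => p.1)) (fun v => v),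
        PySem.List.min? (pts.map (fun p => p.2)) (fun v => v),
        PySem.List.max? (pts.map (fun p => p.2)) (fun v => v) with
  | some min_x_val, some max_x_val, some min_y_val, some max_y_val =>
    match PySem.List.min? (pts.filter (fun p => p.1 == min_x_val)) (fun p => |p.2 - cy|),
          PySem.List.min? (pts.filter (fun p => p.1 == max_x_val)) (fun p => |p.2 - cy|),
          PySem.List.min? (pts.filter (fun p => p.2 == min_y_val)) (fun p => |p.1 - cx|),
          PySem.List.min? (pts.filter (fun p => p.2 == max_y_val)) (fun p => |p.1 - cx|) with
    | some min_x, some max_x, some min_y, some max_y =>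
      [("min_x", min_x), ("max_x", max_x), ("min_y", min_y), ("max_y", max_y)]
    | _, _, _, _ => []   -- unreachable: the candidate lists are nonempty
  | _, _, _, _ => []     -- Python raises ValueError here (pts = []); excluded by Pre_

-- ===== PORT B =====
def select_near_center_points_alt (corners : List (Int × Int)) (center : Int × Int) : List (String × Int × Int) :=
  match corners with
  | [] => []             -- Python raises StopIteration here; excluded by Pre_
  | yx0 :: rest =>
    let cx := center.1
    let cy := center.2
    let p0 : Int × Int := (yx0.2, yx0.1)
    let r := rest.foldl
      (fun s yx =>
        ((fun (b : (Int × Int) × Int) (yx : Int × Int) =>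
            let p : Int × Int := (yx.2, yx.1)
            if p.1 < b.1.1 ∨ (p.1 = b.1.1 ∧ |p.2 - cy| < b.2) then (p, |p.2 - cy|) else b) s.1 yx,
         (fun (b : (Int × Int) × Int) (yx : Int × Int) =>
            let p : Int × Int := (yx.2, yx.1)
            if p.1 > b.1.1 ∨ (p.1 = b.1.1 ∧ |p.2 - cy| < b.2) then (p, |p.2 - cy|) else b) s.2.1 yx,
         (fun (b : (Int × Int) × Int) (yx : Int × Int) =>
            let p : Int × Int := (yx.2, yx.1)
            if p.2 < b.1.2 ∨ (p.2 = b.1.2 ∧ |p.1 - cx| < b.2) then (p, |p.1 - cx|) else b) s.2.2.1 yx,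
         (fun (b : (Int × Int) × Int) (yx : Int × Int) =>
            let p : Int × Int := (yx.2, yx.1)
            if p.2 > b.1.2 ∨ (p.2 = b.1.2 ∧ |p.1 - cx| < b.2) then (p, |p.1 - cx|) else b) s.2.2.2 yx))
      ((p0, |p0.2 - cy|), (p0, |p0.2 - cy|), (p0, |p0.1 - cx|), (p0, |p0.1 - cx|))
    [("min_x", r.1.1), ("max_x", r.2.1.1), ("min_y", r.2.2.1.1), ("max_y", r.2.2.2.1)]

-- ===== PRECONDITION & SPEC =====
-- Pre_ excludes exactly the empty list, on which Python A raises ValueError (min of an empty sequence).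
def Pre_select_near_center_points (corners : List (Int × Int)) (center : Int × Int) : Prop := corners ≠ []
instance (corners : List (Int × Int)) (center : Int × Int) : Decidable (Pre_select_near_center_points corners center) := by unfold Pre_select_near_center_points; infer_instance
def pvWitness_select_near_center_points : (List (Int × Int)) × (Int × Int) := ([(1, 2), (3, 4)], (0, 0))

def Spec_select_near_center_points (corners : List (Int × Int)) (center : Int × Int) (out : List (String × Int × Int)) : Prop := out = select_near_center_points_alt corners center
instance (corners : List (Int × Int)) (center : Int × Int) (out : List (String × Int × Int)) : Decidable (Spec_select_near_center_points corners center out) := by unfold Spec_select_near_center_points; infer_instance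

-- ===== CLAIM (what is proved, stated in full; the proofs are below) =====
def Claim_equal_select_near_center_points : Prop := ∀ (corners : List (Int × Int)) (center : Int × Int), Dom_select_near_center_points corners center → Pre_select_near_center_points corners center → Spec_select_near_center_points corners center (select_near_center_points corners center)

-- ===== LEMMAS AND PROOFS =====

-- One tie-breaking update step of B, abstracted over the extremized value `val` and the tie key `key`.
def pvStep {α : Type} (val key : α → Int) (b : α × Int) (q : α) : α × Int :=
  if val q < val b.1 ∨ (val q = val b.1 ∧ key q < b.2) then (q, key q) else b

-- A's answer for one slot: first `key`-minimal element among those achieving the minimal `val`.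
def pvSel {α : Type} (val key : α → Int) (p : α) (l : List α) : α :=
  (PySem.List.min? ((p :: l).filter (fun q => val q == (l.map val).foldl min (val p))) key).getD p

theorem min?_cons_cons {α : Type} (key : α → Int) (p q : α) (t : List α) :
    PySem.List.min? (p :: q :: t) key = PySem.List.min? ((if key q < key p then q else p) :: t) key := by
  simp only [PySem.List.min?, List.foldl_cons]
  split_ifs <;> rfl

theorem min?_ne_nil {α : Type} (key : α → Int) (xs : List α) (h : xs ≠ []) :
    ∃ m, PySem.List.min? xs key = some m := by
  cases hm : PySem.List.min? xs key with
  | none => exact absurd ((PySem.List.min?_eq_none_iff xs key).mp hm) h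
  | some m => exact ⟨m, rfl⟩

theorem getD_min?_eq {α : Type} (key : α → Int) (xs : List α) (h : xs ≠ []) (d1 d2 : α) :
    (PySem.List.min? xs key).getD d1 = (PySem.List.min? xs key).getD d2 := by
  obtain ⟨m, hm⟩ := min?_ne_nil key xs h; rw [hm]; rfl

theorem pvFilter_ne_nil {α : Type} (val : α → Int) (p : α) (l : List α) :
    (p :: l).filter (fun q => val q == (l.map val).foldl min (val p)) ≠ [] := by
  rcases PySem.List.foldl_min_mem (l.map val) (val p) with h | h
  · exact List.ne_nil_of_mem (List.mem_filter.mpr ⟨List.mem_cons_self, by simp [h]⟩)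
  · obtain ⟨x, hx, hvx⟩ := List.mem_map.mp h
    exact List.ne_nil_of_mem (List.mem_filter.mpr ⟨List.mem_cons_of_mem _ hx, by simp [hvx]⟩)

theorem pvSel_some {α : Type} (val key : α → Int) (p : α) (l : List α) :
    PySem.List.min? ((p :: l).filter (fun q => val q == (l.map val).foldl min (val p))) key
      = some (pvSel val key p l) := by
  obtain ⟨m, hm⟩ := min?_ne_nil key _ (pvFilter_ne_nil val p l)
  rw [hm]; simp [pvSel, hm]

theorem pvSel_cons {α : Type} (val key : α → Int) (p q : α) (l : List α) :
    pvSel val key p (q :: l) =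
      pvSel val key (if val q < val p ∨ (val q = val p ∧ key q < key p) then q else p) l := by
  split_ifs with h
  · have hqp : val q ≤ val p := by rcases h with h | ⟨h, _⟩ <;> omega
    have hinit : min (val p) (val q) = val q := by omega
    simp only [pvSel, List.map_cons, List.foldl_cons, hinit]
    have hle := (PySem.List.foldl_min_le (l.map val) (val q)).1
    set v := (l.map val).foldl min (val q) with hv
    by_cases hq : val q = v
    · by_cases hp : val p = v
      · have hkey : key q < key p := by rcases h with h | ⟨_, h⟩ <;> [omega; exact h]
        simp only [List.filter_cons, show (val p == v) = true by simp [hp],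
          show (val q == v) = true by simp [hq], if_pos]
        rw [min?_cons_cons, if_pos hkey]
        exact getD_min?_eq key _ (List.cons_ne_nil _ _) _ _
      · simp only [List.filter_cons, show (val p == v) = false by simp [hp],
          show (val q == v) = true by simp [hq]]
        simp only [Bool.false_eq_true, if_false, if_pos]
        exact getD_min?_eq key _ (List.cons_ne_nil _ _) _ _
    · have hp : ¬ (val p = v) := by omega
      simp only [List.filter_cons, show (val p == v) = false by simp [hp],
        show (val q == v) = false by simp [hq]]
      simp only [Bool.false_eq_true, if_false]
      have hmem : v ∈ l.map val := by
        rcases PySem.List.foldl_min_mem (l.map val) (val q) with h' | h'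
        · omega
        · exact h'
      obtain ⟨x, hx, hvx⟩ := List.mem_map.mp hmem
      exact getD_min?_eq key _
        (List.ne_nil_of_mem (List.mem_filter.mpr ⟨hx, by simp [hvx]⟩)) _ _
  · have hpq : val p ≤ val q := by by_contra hc; exact h (Or.inl (by omega))
    have hinit : min (val p) (val q) = val p := by omega
    simp only [pvSel, List.map_cons, List.foldl_cons, hinit]
    have hle := (PySem.List.foldl_min_le (l.map val) (val p)).1
    set v := (l.map val).foldl min (val p) with hv
    by_cases hq : val q = v
    · have hp : val p = v := by omega
      have hkey : ¬ (key q < key p) := fun hk => h (Or.inr ⟨by omega, hk⟩)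
      simp only [List.filter_cons, show (val p == v) = true by simp [hp],
        show (val q == v) = true by simp [hq], if_pos]
      rw [min?_cons_cons, if_neg hkey]
    · simp only [List.filter_cons, show (val q == v) = false by simp [hq]]
      simp only [Bool.false_eq_true, if_false]

theorem pvFold {α : Type} (val key : α → Int) (p : α) (l : List α) :
    l.foldl (pvStep val key) (p, key p) = (pvSel val key p l, key (pvSel val key p l)) := by
  induction l generalizing p with
  | nil => simp [pvSel, PySem.List.min?]
  | cons q l ih =>
    rw [List.foldl_cons, pvSel_cons]
    have hstep : pvStep val key (p, key p) q =
        ((if val q < val p ∨ (val q = val p ∧ key q < key p) then q else p),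
         key (if val q < val p ∨ (val q = val p ∧ key q < key p) then q else p)) := by
      simp only [pvStep]
      split_ifs <;> simp_all
    rw [hstep, ih]

theorem foldl_min_neg (l : List Int) (a : Int) :
    (l.map (fun x => -x)).foldl min (-a) = -(l.foldl max a) := by
  induction l generalizing a with
  | nil => rfl
  | cons x t ih =>
    simp only [List.map_cons, List.foldl_cons]
    rw [show min (-a) (-x) = -(max a x) from Int.neg_min_neg a x, ih]

-- specialized forms of pvSel_some matching the goal after beta/projection reduction
theorem sel_min_fst (key : Int × Int → Int) (a b : Int) (l : List (Int × Int)) :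
    PySem.List.min? (((a, b) :: l).filter (fun q => q.1 == (l.map (fun p => p.1)).foldl min a)) key
      = some (pvSel (fun p => p.1) key (a, b) l) :=
  pvSel_some (fun p => p.1) key (a, b) l

theorem sel_max_fst (key : Int × Int → Int) (a b : Int) (l : List (Int × Int)) :
    PySem.List.min? (((a, b) :: l).filter (fun q => q.1 == (l.map (fun p => p.1)).foldl max a)) key
      = some (pvSel (fun p => -p.1) key (a, b) l) := by
  have h := pvSel_some (fun p : Int × Int => -p.1) key (a, b) l
  rw [show l.map (fun p : Int × Int => -p.1) = (l.map (fun p : Int × Int => p.1)).map (fun x => -x) by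
        simp [List.map_map, Function.comp_def]] at h
  rw [show -(a, b).1 = -a from rfl] at h
  rw [foldl_min_neg] at h
  rw [show (fun q : Int × Int => -q.1 == -((l.map (fun p : Int × Int => p.1)).foldl max a))
        = (fun q : Int × Int => q.1 == (l.map (fun p : Int × Int => p.1)).foldl max a) by
        funext q; simp] at h
  exact h

theorem sel_min_snd (key : Int × Int → Int) (a b : Int) (l : List (Int × Int)) :
    PySem.List.min? (((a, b) :: l).filter (fun q => q.2 == (l.map (fun p => p.2)).foldl min b)) key
      = some (pvSel (fun p => p.2) key (a, b) l) :=
  pvSel_some (fun p => p.2) key (a, b) l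

theorem sel_max_snd (key : Int × Int → Int) (a b : Int) (l : List (Int × Int)) :
    PySem.List.min? (((a, b) :: l).filter (fun q => q.2 == (l.map (fun p => p.2)).foldl max b)) key
      = some (pvSel (fun p => -p.2) key (a, b) l) := by
  have h := pvSel_some (fun p : Int × Int => -p.2) key (a, b) l
  rw [show l.map (fun p : Int × Int => -p.2) = (l.map (fun p : Int × Int => p.2)).map (fun x => -x) by
        simp [List.map_map, Function.comp_def]] at h
  rw [show -(a, b).2 = -b from rfl] at h
  rw [foldl_min_neg] at h
  rw [show (fun q : Int × Int => -q.2 == -((l.map (fun p : Int × Int => p.2)).foldl max b))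
        = (fun q : Int × Int => q.2 == (l.map (fun p : Int × Int => p.2)).foldl max b) by
        funext q; simp] at h
  exact h

theorem foldB (cx cy : Int)
    (init : ((Int × Int) × Int) × ((Int × Int) × Int) × ((Int × Int) × Int) × ((Int × Int) × Int))
    (rest : List (Int × Int)) :
    rest.foldl
      (fun s yx =>
        (if yx.2 < s.1.1.1 ∨ yx.2 = s.1.1.1 ∧ |yx.1 - cy| < s.1.2 then ((yx.2, yx.1), |yx.1 - cy|)
          else s.1,
         if yx.2 > s.2.1.1.1 ∨ yx.2 = s.2.1.1.1 ∧ |yx.1 - cy| < s.2.1.2 then ((yx.2, yx.1), |yx.1 - cy|)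
          else s.2.1,
         if yx.1 < s.2.2.1.1.2 ∨ yx.1 = s.2.2.1.1.2 ∧ |yx.2 - cx| < s.2.2.1.2 then ((yx.2, yx.1), |yx.2 - cx|)
          else s.2.2.1,
         if yx.1 > s.2.2.2.1.2 ∨ yx.1 = s.2.2.2.1.2 ∧ |yx.2 - cx| < s.2.2.2.2 then ((yx.2, yx.1), |yx.2 - cx|)
          else s.2.2.2)) init
      = (rest.map (fun yx => (yx.2, yx.1))).foldl
          (fun s p =>
            (pvStep (fun r => r.1) (fun r => |r.2 - cy|) s.1 p,
             pvStep (fun r => -r.1) (fun r => |r.2 - cy|) s.2.1 p,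
             pvStep (fun r => r.2) (fun r => |r.1 - cx|) s.2.2.1 p,
             pvStep (fun r => -r.2) (fun r => |r.1 - cx|) s.2.2.2 p)) init := by
  rw [List.foldl_map]
  congr 1
  funext s yx
  simp only [pvStep]
  refine congrArg₂ Prod.mk ?_ (congrArg₂ Prod.mk ?_ (congrArg₂ Prod.mk ?_ ?_))
  · rfl
  · refine (if_congr ?_ rfl rfl).symm
    generalize |yx.1 - cy| = d
    omega
  · rfl
  · refine (if_congr ?_ rfl rfl).symm
    generalize |yx.2 - cx| = d
    omega

-- specialized forms of pvFold matching the goal's initial accumulators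
theorem fold_min_x (cy a b : Int) (l : List (Int × Int)) :
    l.foldl (pvStep (fun r : Int × Int => r.1) (fun r => |r.2 - cy|)) ((a, b), |b - cy|)
      = (pvSel (fun r : Int × Int => r.1) (fun r => |r.2 - cy|) (a, b) l,
         |(pvSel (fun r : Int × Int => r.1) (fun r => |r.2 - cy|) (a, b) l).2 - cy|) :=
  pvFold _ _ (a, b) l

theorem fold_max_x (cy a b : Int) (l : List (Int × Int)) :
    l.foldl (pvStep (fun r : Int × Int => -r.1) (fun r => |r.2 - cy|)) ((a, b), |b - cy|)
      = (pvSel (fun r : Int × Int => -r.1) (fun r => |r.2 - cy|) (a, b) l,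
         |(pvSel (fun r : Int × Int => -r.1) (fun r => |r.2 - cy|) (a, b) l).2 - cy|) :=
  pvFold _ _ (a, b) l

theorem fold_min_y (cx a b : Int) (l : List (Int × Int)) :
    l.foldl (pvStep (fun r : Int × Int => r.2) (fun r => |r.1 - cx|)) ((a, b), |a - cx|)
      = (pvSel (fun r : Int × Int => r.2) (fun r => |r.1 - cx|) (a, b) l,
         |(pvSel (fun r : Int × Int => r.2) (fun r => |r.1 - cx|) (a, b) l).1 - cx|) :=
  pvFold _ _ (a, b) l

theorem fold_max_y (cx a b : Int) (l : List (Int × Int)) :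
    l.foldl (pvStep (fun r : Int × Int => -r.2) (fun r => |r.1 - cx|)) ((a, b), |a - cx|)
      = (pvSel (fun r : Int × Int => -r.2) (fun r => |r.1 - cx|) (a, b) l,
         |(pvSel (fun r : Int × Int => -r.2) (fun r => |r.1 - cx|) (a, b) l).1 - cx|) :=
  pvFold _ _ (a, b) l

-- ===== VERDICT (by name: the statement is the Claim_ definition above) =====
theorem select_near_center_points_spec : Claim_equal_select_near_center_points := by
  intro corners center _hdom hpre
  unfold Spec_select_near_center_points
  cases corners with
  | nil => exact absurd rfl hpre
  | cons yx0 rest =>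
    simp only [select_near_center_points, select_near_center_points_alt, List.map_cons]
    rw [foldB center.1 center.2]
    rw [PySem.List.foldl_prod_mk
        (f := fun b p => pvStep (fun r : Int × Int => r.1) (fun r => |r.2 - center.2|) b p)
        (g := fun t p =>
          (pvStep (fun r : Int × Int => -r.1) (fun r => |r.2 - center.2|) t.1 p,
           pvStep (fun r : Int × Int => r.2) (fun r => |r.1 - center.1|) t.2.1 p,
           pvStep (fun r : Int × Int => -r.2) (fun r => |r.1 - center.1|) t.2.2 p))]
    rw [PySem.List.foldl_prod_mk
        (f := fun b p => pvStep (fun r : Int × Int => -r.1) (fun r => |r.2 - center.2|) b p)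
        (g := fun t p =>
          (pvStep (fun r : Int × Int => r.2) (fun r => |r.1 - center.1|) t.1 p,
           pvStep (fun r : Int × Int => -r.2) (fun r => |r.1 - center.1|) t.2 p))]
    rw [PySem.List.foldl_prod_mk
        (f := fun b p => pvStep (fun r : Int × Int => r.2) (fun r => |r.1 - center.1|) b p)
        (g := fun b p => pvStep (fun r : Int × Int => -r.2) (fun r => |r.1 - center.1|) b p)]
    rw [fold_min_x, fold_max_x, fold_min_y, fold_max_y]
    rw [PySem.List.min?_id_cons, PySem.List.max?_id_cons,
        PySem.List.min?_id_cons, PySem.List.max?_id_cons]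
    simp only []
    rw [sel_min_fst, sel_max_fst, sel_min_snd, sel_max_snd]
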